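-- pv_equiv track=rewrite | github.com/aororn/book-audio-filter | Инструменты/smart_compare.py | merge_adjacent_opcodes
-- ===== SOURCE A (Python) =====
-- def merge_adjacent_opcodes(opcodes: list) -> list:
--     """
--     Объединяет соседние opcodes с одинаковым тегом.
--
--     Это необходимо после посегментного сравнения, чтобы
--     объединить 'equal' блоки из разных сегментов.
--
--     Args:
--         opcodes: список кортежей (tag, i1, i2, j1, j2)
--
--     Returns:
--         объединённый список opcodes
--     """
--     if not opcodes:
--         return opcodes
--
--     merged = [list(opcodes[0])]
--     for tag, i1, i2, j1, j2 in opcodes[1:]: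
--         prev = merged[-1]
--         # Если тот же тег и позиции смежные
--         if tag == prev[0] and i1 == prev[2] and j1 == prev[4]:
--             merged[-1] = [tag, prev[1], i2, prev[3], j2]
--         else:
--             merged.append([tag, i1, i2, j1, j2])
--
--     return [tuple(op) for op in merged]
-- ===== SOURCE B (Python) =====
-- def merge_adjacent_opcodes(opcodes: list) -> list:
--     if not opcodes:
--         return opcodes
--     # pass 1: label every opcode with a group id; the id increments whenever
--     # the opcode does not chain onto its immediate predecessor
--     pairs = []
--     gid = 0
--     prev = None
--     for op in opcodes:
--         tag, i1, i2, j1, j2 = op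
--         if prev is not None and (tag != prev[0] or i1 != prev[2] or j1 != prev[4]):
--             gid += 1
--         pairs.append((gid, (tag, i1, i2, j1, j2)))
--         prev = op
--     # pass 2: cut the labelled list into maximal runs of equal group id and
--     # emit one tuple per run from its first and last members
--     result = []
--     rest = pairs
--     while rest:
--         g, first = rest[0]
--         k = 1
--         while k < len(rest) and rest[k][0] == g:
--             k += 1
--         last = rest[k - 1][1]
--         result.append((first[0], first[1], last[2], first[3], last[4]))
--         rest = rest[k:]
--     return result
-- ===== Notes on version B (the rewrite author's own statement) =====
-- stated objective: alternative
-- what changed: Replaces A's single stateful pass that mutates the last merged block with a two-phase label-then-chunk scheme: one pass assigns each opcode a group id that increments at every adjacency/tag break relative to the immediate predecessor, then the labelled list is cut into maximal equal-id runs and each run emits (first.tag, first.i1, last.i2, first.j1, last.j2).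
import Mathlib
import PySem

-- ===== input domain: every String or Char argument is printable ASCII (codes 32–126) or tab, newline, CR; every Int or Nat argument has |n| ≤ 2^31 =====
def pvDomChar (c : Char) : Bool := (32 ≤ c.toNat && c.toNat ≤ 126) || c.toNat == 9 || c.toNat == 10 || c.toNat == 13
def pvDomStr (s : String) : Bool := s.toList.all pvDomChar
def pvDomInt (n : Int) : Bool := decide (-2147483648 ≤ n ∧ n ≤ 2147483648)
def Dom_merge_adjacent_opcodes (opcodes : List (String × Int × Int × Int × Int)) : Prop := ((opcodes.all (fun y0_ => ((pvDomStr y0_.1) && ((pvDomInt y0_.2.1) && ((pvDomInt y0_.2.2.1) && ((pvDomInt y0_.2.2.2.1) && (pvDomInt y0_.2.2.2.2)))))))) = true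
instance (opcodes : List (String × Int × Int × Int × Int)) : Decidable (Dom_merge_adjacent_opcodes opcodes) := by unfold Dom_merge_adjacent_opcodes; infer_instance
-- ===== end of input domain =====

-- B replaces A's stateful merge of a growing last block by a label-then-chunk
-- scheme (group ids, then maximal equal-id runs); objective: alternative.

-- ===== PORT A =====
-- merged is kept head-first (Python's merged[-1] is the head); reversed at the end.
def merge_adjacent_opcodes (opcodes : List (String × Int × Int × Int × Int)) : List (String × Int × Int × Int × Int) :=
  match opcodes with
  | [] => opcodes
  | first :: rest =>
    let merged := rest.foldl (fun acc op =>
      match acc with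
      | [] => [op]  -- unreachable: the accumulator starts nonempty and stays nonempty
      | prev :: tl =>
        if op.1 == prev.1 && op.2.1 == prev.2.2.1 && op.2.2.2.1 == prev.2.2.2.2 then
          (op.1, prev.2.1, op.2.2.1, prev.2.2.2.1, op.2.2.2.2) :: tl
        else
          op :: prev :: tl) [first]
    merged.reverse

-- ===== PORT B =====
-- pass 1 of Source B: label each opcode with its group id (prev is the previous opcode)
def pvGids (gid : Nat) (prev : String × Int × Int × Int × Int) :
    List (String × Int × Int × Int × Int) → List (Nat × (String × Int × Int × Int × Int))
  | [] => []
  | op :: rest =>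
    let g' := if op.1 == prev.1 && op.2.1 == prev.2.2.1 && op.2.2.2.1 == prev.2.2.2.2 then gid else gid + 1
    (g', op) :: pvGids g' op rest

-- inner while-loop of pass 2: a maximal run of equal group ids (takeWhile / dropWhile)
def pvGroupBy : List (Nat × (String × Int × Int × Int × Int)) → List (List (String × Int × Int × Int × Int))
  | [] => []
  | (g, op) :: rest =>
    (op :: (rest.takeWhile (fun p => p.1 == g)).map Prod.snd)
      :: pvGroupBy (rest.dropWhile (fun p => p.1 == g))
termination_by l => l.length
decreasing_by
  have := List.length_dropWhile_le (fun p => p.1 == g) rest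
  simp only [List.length_cons]
  omega

-- emit one tuple per run from its first and last members
def pvEmit (run : List (String × Int × Int × Int × Int)) : String × Int × Int × Int × Int :=
  match run with
  | [] => ("", 0, 0, 0, 0)  -- unreachable: pvGroupBy only produces nonempty runs
  | first :: tl =>
    let last := tl.getLastD first
    (first.1, first.2.1, last.2.2.1, first.2.2.2.1, last.2.2.2.2)

def merge_adjacent_opcodes_alt (opcodes : List (String × Int × Int × Int × Int)) : List (String × Int × Int × Int × Int) :=
  match opcodes with
  | [] => opcodes
  | first :: rest => (pvGroupBy ((0, first) :: pvGids 0 first rest)).map pvEmit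

-- ===== PRECONDITION & SPEC =====
def Spec_merge_adjacent_opcodes (opcodes : List (String × Int × Int × Int × Int)) (out : List (String × Int × Int × Int × Int)) : Prop := out = merge_adjacent_opcodes_alt opcodes
instance (opcodes : List (String × Int × Int × Int × Int)) (out : List (String × Int × Int × Int × Int)) : Decidable (Spec_merge_adjacent_opcodes opcodes out) := by unfold Spec_merge_adjacent_opcodes; infer_instance

-- ===== CLAIM (what is proved, stated in full; the proofs are below) =====
def Claim_equal_merge_adjacent_opcodes : Prop := ∀ (opcodes : List (String × Int × Int × Int × Int)), Dom_merge_adjacent_opcodes opcodes → Spec_merge_adjacent_opcodes opcodes (merge_adjacent_opcodes opcodes)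

-- ===== LEMMAS AND PROOFS =====

-- common reference recursion: cur is the block being grown
def pvMergeRec (cur : String × Int × Int × Int × Int) :
    List (String × Int × Int × Int × Int) → List (String × Int × Int × Int × Int)
  | [] => [cur]
  | op :: rest =>
    if op.1 == cur.1 && op.2.1 == cur.2.2.1 && op.2.2.2.1 == cur.2.2.2.2 then
      pvMergeRec (op.1, cur.2.1, op.2.2.1, cur.2.2.2.1, op.2.2.2.2) rest
    else
      cur :: pvMergeRec op rest

lemma pvA_fold (rest : List (String × Int × Int × Int × Int)) :
    ∀ (prev : String × Int × Int × Int × Int) (tl : List (String × Int × Int × Int × Int)),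
    (rest.foldl (fun acc op =>
      match acc with
      | [] => [op]
      | prev :: tl =>
        if op.1 == prev.1 && op.2.1 == prev.2.2.1 && op.2.2.2.1 == prev.2.2.2.2 then
          (op.1, prev.2.1, op.2.2.1, prev.2.2.2.1, op.2.2.2.2) :: tl
        else
          op :: prev :: tl) (prev :: tl)).reverse
      = tl.reverse ++ pvMergeRec prev rest := by
  induction rest with
  | nil => intro prev tl; simp [pvMergeRec]
  | cons op rest ih =>
    intro prev tl
    simp only [List.foldl_cons]
    by_cases h : (op.1 == prev.1 && op.2.1 == prev.2.2.1 && op.2.2.2.1 == prev.2.2.2.2) = true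
    · simp only [h, if_pos, pvMergeRec]
      rw [ih]
    · rw [if_neg h, ih, pvMergeRec, if_neg h]
      simp

lemma pvB_group (l : List (String × Int × Int × Int × Int)) :
    ∀ (g : Nat) (op : String × Int × Int × Int × Int) (f1 f3 : Int),
    pvMergeRec (op.1, f1, op.2.2.1, f3, op.2.2.2.2) l
      = (op.1, f1,
          (((pvGids g op l).takeWhile (fun p => p.1 == g)).map Prod.snd).getLastD op |>.2.2.1,
         f3,
          (((pvGids g op l).takeWhile (fun p => p.1 == g)).map Prod.snd).getLastD op |>.2.2.2.2)
        :: (pvGroupBy ((pvGids g op l).dropWhile (fun p => p.1 == g))).map pvEmit := by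
  induction l with
  | nil =>
    intro g op f1 f3
    simp [pvGids, pvMergeRec, pvGroupBy]
  | cons op2 l ih =>
    intro g op f1 f3
    obtain ⟨t2, a2, b2, c2, d2⟩ := op2
    simp only [pvGids]
    by_cases h : (t2 == op.1 && a2 == op.2.2.1 && c2 == op.2.2.2.2) = true
    · -- no break: op2 joins op's run
      rw [if_pos h]
      rw [pvMergeRec, if_pos h]
      rw [ih g (t2, a2, b2, c2, d2) f1 f3]
      have ht : t2 = op.1 := by
        simp only [Bool.and_eq_true, beq_iff_eq] at h; exact h.1.1
      have hg : ((g : Nat) == g) = true := by simp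
      simp only [List.takeWhile_cons, List.dropWhile_cons, hg, if_true, List.map_cons,
        List.getLastD_cons, ht]
    · -- break: op's run ends here, op2 starts a new one
      rw [if_neg h]
      rw [pvMergeRec, if_neg h]
      have htw : ((g + 1 : Nat) == g) = false := by simp
      simp only [List.takeWhile_cons, List.dropWhile_cons, htw, Bool.false_eq_true,
        if_false, List.map_nil, List.getLastD_nil]
      rw [pvGroupBy]
      rw [ih (g + 1) (t2, a2, b2, c2, d2) a2 c2]
      simp [pvEmit]

lemma pvAB (opcodes : List (String × Int × Int × Int × Int)) :
    merge_adjacent_opcodes opcodes = merge_adjacent_opcodes_alt opcodes := by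
  cases opcodes with
  | nil => rfl
  | cons first rest =>
    show (rest.foldl _ [first]).reverse = _
    rw [pvA_fold rest first []]
    obtain ⟨t, a, b, c, d⟩ := first
    show pvMergeRec (t, a, b, c, d) rest
      = (pvGroupBy ((0, (t, a, b, c, d)) :: pvGids 0 (t, a, b, c, d) rest)).map pvEmit
    rw [pvGroupBy]
    rw [pvB_group rest 0 (t, a, b, c, d) a c]
    simp [pvEmit]

-- ===== VERDICT (by name: the statement is the Claim_ definition above) =====
theorem merge_adjacent_opcodes_spec : Claim_equal_merge_adjacent_opcodes := by
  intro opcodes _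
  unfold Spec_merge_adjacent_opcodes
  exact pvAB opcodes
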